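-- pv_equiv track=rewrite | github.com/xaviermaltas/healthcare-rag-slm | code/src/main/core/ingestion/chunking/medical_chunker.py | _get_sentence_overlap
-- ===== SOURCE A (Python) =====
-- from typing import Dict, List, Optional, Tuple
--
-- def _get_sentence_overlap(sentences: List[str], overlap_size: int) -> List[str]:
--     """Get overlap sentences"""
--     if not sentences:
--         return []
--
--     overlap_sentences = []
--     current_length = 0
--
--     for sentence in reversed(sentences):
--         if current_length + len(sentence) <= overlap_size:
--             overlap_sentences.insert(0, sentence)
--             current_length += len(sentence)
--         else:
--             break
--
--     return overlap_sentences
-- ===== SOURCE B (Python) =====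
-- from typing import List
--
-- def _get_sentence_overlap(sentences: List[str], overlap_size: int) -> List[str]:
--     """Get overlap sentences: suffix cumulative lengths + binary search for the cutoff."""
--     if not sentences:
--         return []
--
--     cumsums = []
--     total = 0
--     for s in reversed(sentences):
--         total += len(s)
--         cumsums.append(total)
--
--     # rightmost insertion point of overlap_size in the nondecreasing cumsums
--     lo, hi = 0, len(cumsums)
--     while lo < hi:
--         mid = (lo + hi) // 2
--         if overlap_size < cumsums[mid]:
--             hi = mid
--         else:
--             lo = mid + 1
--
--     return sentences[len(sentences) - lo:]
-- ===== Notes on version B (the rewrite author's own statement) =====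
-- stated objective: alternative
-- what changed: Replaces the greedy reversed scan-with-break by building a table of suffix cumulative lengths and binary-searching (hand-written bisect_right) for the largest count of trailing sentences whose total length fits, then returning that slice.
import Mathlib
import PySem

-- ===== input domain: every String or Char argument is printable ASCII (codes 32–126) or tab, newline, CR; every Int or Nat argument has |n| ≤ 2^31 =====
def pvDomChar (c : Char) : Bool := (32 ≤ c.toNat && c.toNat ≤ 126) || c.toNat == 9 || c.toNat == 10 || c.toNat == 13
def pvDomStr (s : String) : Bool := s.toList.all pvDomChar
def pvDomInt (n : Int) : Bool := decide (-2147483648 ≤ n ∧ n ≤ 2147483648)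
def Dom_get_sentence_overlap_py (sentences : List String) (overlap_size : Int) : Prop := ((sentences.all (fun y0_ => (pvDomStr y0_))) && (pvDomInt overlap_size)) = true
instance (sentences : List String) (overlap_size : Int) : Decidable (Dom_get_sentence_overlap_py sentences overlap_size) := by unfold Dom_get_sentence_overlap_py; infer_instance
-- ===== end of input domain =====

-- B replaces A's greedy reversed scan-with-break by a suffix cumulative-length table plus a
-- hand-written binary search (bisect_right) for the cutoff; an alternative algorithm, not faster.


-- ===== PORT A =====
-- the `for sentence in reversed(sentences): … else break` loop, state = (overlap_sentences, current_length);
-- `overlap_sentences.insert(0, sentence)` is `s :: acc`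
def pvLoopA (overlap_size : Int) : List String → List String → Int → List String
  | [], acc, _ => acc
  | s :: rest, acc, cur =>
    if cur + PySem.Str.len s ≤ overlap_size then
      pvLoopA overlap_size rest (s :: acc) (cur + PySem.Str.len s)
    else acc

def get_sentence_overlap_py (sentences : List String) (overlap_size : Int) : List String :=
  if sentences = [] then []
  else pvLoopA overlap_size sentences.reverse [] 0

-- ===== PORT B =====
-- the `while lo < hi` binary-search loop of Source B; cumsums[mid] is `getD mid 0`
-- (the index is always in range: lo < hi ≤ cumsums.length throughout)
def pvBisect (c : List Int) (x : Int) (lo hi : Nat) : Nat :=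
  if _h : lo < hi then
    let mid := (lo + hi) / 2
    if x < c.getD mid 0 then pvBisect c x lo mid else pvBisect c x (mid + 1) hi
  else lo
termination_by hi - lo
decreasing_by all_goals omega

def get_sentence_overlap_py_alt (sentences : List String) (overlap_size : Int) : List String :=
  if sentences = [] then []
  else
    -- the cumsums/total building loop over reversed(sentences)
    let p := sentences.reverse.foldl
      (fun (p : List Int × Int) s => (p.1 ++ [p.2 + PySem.Str.len s], p.2 + PySem.Str.len s)) ([], 0)
    let lo := pvBisect p.1 overlap_size 0 p.1.length
    -- sentences[len(sentences) - lo:], with len(sentences) - lo ≥ 0 since lo ≤ len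
    sentences.drop (sentences.length - lo)

-- ===== PRECONDITION & SPEC =====
def Spec_get_sentence_overlap_py (sentences : List String) (overlap_size : Int) (out : List String) : Prop := out = get_sentence_overlap_py_alt sentences overlap_size
instance (sentences : List String) (overlap_size : Int) (out : List String) : Decidable (Spec_get_sentence_overlap_py sentences overlap_size out) := by unfold Spec_get_sentence_overlap_py; infer_instance

-- ===== CLAIM (what is proved, stated in full; the proofs are below) =====
def Claim_equal_get_sentence_overlap_py : Prop := ∀ (sentences : List String) (overlap_size : Int), Dom_get_sentence_overlap_py sentences overlap_size → Spec_get_sentence_overlap_py sentences overlap_size (get_sentence_overlap_py sentences overlap_size)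

-- ===== LEMMAS AND PROOFS =====

-- the prefix of R that A's greedy loop takes (in R's order)
def pvGreedy (x : Int) : Int → List String → List String
  | _, [] => []
  | cur, s :: r =>
    if cur + PySem.Str.len s ≤ x then s :: pvGreedy x (cur + PySem.Str.len s) r else []

-- the cumulative-sum list Source B builds, as a clean recursion
def pvCsum (t : Int) : List String → List Int
  | [] => []
  | s :: r => (t + PySem.Str.len s) :: pvCsum (t + PySem.Str.len s) r

lemma pvLoopA_eq (x : Int) (R : List String) : ∀ (acc : List String) (cur : Int),
    pvLoopA x R acc cur = (pvGreedy x cur R).reverse ++ acc := by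
  induction R with
  | nil => intro acc cur; simp [pvLoopA, pvGreedy]
  | cons s r ih =>
    intro acc cur
    simp only [pvLoopA, pvGreedy]
    split
    · rw [ih]; simp
    · simp

lemma pvFold_eq (R : List String) : ∀ (acc : List Int) (t : Int),
    R.foldl (fun (p : List Int × Int) s => (p.1 ++ [p.2 + PySem.Str.len s], p.2 + PySem.Str.len s)) (acc, t)
      = (acc ++ pvCsum t R, t + (R.map (fun s => PySem.Str.len s)).sum) := by
  induction R with
  | nil => intro acc t; simp [pvCsum]
  | cons s r ih =>
    intro acc t
    simp only [List.foldl_cons, ih, pvCsum, List.map_cons, List.sum_cons]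
    simp [List.append_assoc, add_assoc]

lemma pvCsum_length (t : Int) (R : List String) : (pvCsum t R).length = R.length := by
  induction R generalizing t with
  | nil => simp [pvCsum]
  | cons s r ih => simp [pvCsum, ih]

lemma pvStrLen_nonneg (s : String) : 0 ≤ PySem.Str.len s := by
  rw [PySem.Str.len_eq]; positivity

lemma pvCsum_le (t : Int) (R : List String) : ∀ v ∈ pvCsum t R, t ≤ v := by
  induction R generalizing t with
  | nil => simp [pvCsum]
  | cons s r ih =>
    intro v hv
    simp only [pvCsum, List.mem_cons] at hv
    have h0 := pvStrLen_nonneg s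
    rcases hv with rfl | hv
    · omega
    · have := ih (t + PySem.Str.len s) v hv; omega

lemma pvCsum_pairwise (t : Int) (R : List String) : (pvCsum t R).Pairwise (· ≤ ·) := by
  induction R generalizing t with
  | nil => simp [pvCsum]
  | cons s r ih =>
    simp only [pvCsum, List.pairwise_cons]
    exact ⟨pvCsum_le _ _, ih _⟩

lemma pvMono_getD (c : List Int) (hc : c.Pairwise (· ≤ ·)) (i j : Nat) (hij : i ≤ j)
    (hj : j < c.length) : c.getD i 0 ≤ c.getD j 0 := by
  rcases eq_or_lt_of_le hij with rfl | hlt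
  · exact le_refl _
  · rw [List.getD_eq_getElem c 0 (by omega), List.getD_eq_getElem c 0 hj]
    exact List.pairwise_iff_getElem.mp hc i j (by omega) hj hlt

lemma pvBisect_spec (c : List Int) (x : Int) (hc : c.Pairwise (· ≤ ·)) (lo hi : Nat) :
    hi ≤ c.length → lo ≤ hi →
    (∀ i, i < lo → c.getD i 0 ≤ x) →
    (∀ i, hi ≤ i → i < c.length → x < c.getD i 0) →
    (pvBisect c x lo hi ≤ c.length ∧
     (∀ i, i < pvBisect c x lo hi → c.getD i 0 ≤ x) ∧
     (∀ i, pvBisect c x lo hi ≤ i → i < c.length → x < c.getD i 0)) := by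
  fun_induction pvBisect c x lo hi with
  | case1 lo hi h mid hlt ih =>
    intro hhi hlohi hbelow habove
    refine ih (by omega) (by omega) hbelow ?_
    intro i hmi hil
    have hxc : x < c.getD mid 0 := hlt
    exact lt_of_lt_of_le hxc (pvMono_getD c hc mid i hmi hil)
  | case2 lo hi h mid hge ih =>
    intro hhi hlohi hbelow habove
    refine ih (by omega) (by omega) ?_ habove
    intro i hi'
    have hcm : c.getD mid 0 ≤ x := not_lt.mp hge
    exact le_trans (pvMono_getD c hc i mid (by omega) (by omega)) hcm
  | case3 lo hi h =>
    intro hhi hlohi hbelow habove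
    refine ⟨by omega, ?_, ?_⟩
    · intro i hil; exact hbelow i hil
    · intro i hli hil; exact habove i (by omega) hil

lemma pvGreedy_eq_take (x : Int) (R : List String) : ∀ (t : Int) (m : Nat),
    m ≤ R.length →
    (∀ i, i < m → (pvCsum t R).getD i 0 ≤ x) →
    (m < R.length → x < (pvCsum t R).getD m 0) →
    pvGreedy x t R = R.take m := by
  induction R with
  | nil =>
    intro t m hm _ _
    simp only [List.length_nil, Nat.le_zero] at hm
    subst hm
    simp [pvGreedy]
  | cons s r ih =>
    intro t m hm hbelow habove
    match m with
    | 0 =>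
      have hx : x < t + PySem.Str.len s := by
        have := habove (by simp)
        simpa [pvCsum] using this
      simp only [pvGreedy, List.take_zero]
      rw [if_neg (by omega)]
    | Nat.succ m' =>
      have hcond : t + PySem.Str.len s ≤ x := by
        have := hbelow 0 (by omega)
        simpa [pvCsum] using this
      simp only [pvGreedy, List.take_succ_cons]
      rw [if_pos hcond]
      congr 1
      refine ih (t + PySem.Str.len s) m' (by simpa using hm) ?_ ?_
      · intro i hi
        have := hbelow (i + 1) (by omega)
        simpa [pvCsum] using this
      · intro hlt
        have := habove (by simpa using Nat.succ_lt_succ hlt)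
        simpa [pvCsum] using this

-- ===== VERDICT (by name: the statement is the Claim_ definition above) =====
theorem get_sentence_overlap_py_spec : Claim_equal_get_sentence_overlap_py := by
  intro sentences x _
  unfold Spec_get_sentence_overlap_py get_sentence_overlap_py get_sentence_overlap_py_alt
  by_cases hnil : sentences = []
  · simp [hnil]
  · rw [if_neg hnil, if_neg hnil]
    set R := sentences.reverse with hR
    rw [pvFold_eq]
    simp only [List.nil_append]
    set c := pvCsum 0 R with hc
    set m := pvBisect c x 0 c.length with hm
    have hclen : c.length = R.length := pvCsum_length 0 R
    have hspec := pvBisect_spec c x (pvCsum_pairwise 0 R) 0 c.length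
      (le_refl _) (Nat.zero_le _) (by omega) (by intro i h1 h2; omega)
    obtain ⟨hmle, hbelow, habove⟩ := hspec
    have hgreedy : pvGreedy x 0 R = R.take m := by
      refine pvGreedy_eq_take x R 0 m (by omega) hbelow ?_
      intro hlt
      exact habove m (le_refl _) (by omega)
    rw [pvLoopA_eq, hgreedy]
    simp only [List.append_nil]
    rw [hR, List.take_reverse]
    simp
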